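-- pv_equiv track=rewrite | github.com/Steven-ZhangJM/CS263_Final_Project | solution_gen/p041_1.py | largest_pandigital
-- ===== SOURCE A (Python) =====
-- def largest_pandigital(start, end):
--     pandigital_primes = []
--     for i in range(10, 100000):
--         prime_flag = True
--         for j in str(i):
--             if j not in str(start) + str(end):
--                 prime_flag = False
--                 break
--         if prime_flag:
--             pandigital_primes.append(i)
--
--     return pandigital_primes
-- ===== SOURCE B (Python) =====
-- def largest_pandigital(start, end):
--     s = str(start) + str(end)
--     digits = [d for d in range(10) if str(d) in s]
--     level = [d for d in digits if d != 0]
--     result = []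
--     for _ in range(4):
--         level = [v * 10 + d for v in level for d in digits]
--         result.extend(level)
--     return result
-- ===== Notes on version B (the rewrite author's own statement) =====
-- stated objective: faster
-- what changed: B no longer scans all 99990 integers testing each against the concatenated string: it builds the allowed digit alphabet once, then generates exactly the qualifying numbers level by level (lengths 2..5) by appending allowed digits to allowed prefixes, which is output-sensitive in the size of the allowed digit set.
import Mathlib
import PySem

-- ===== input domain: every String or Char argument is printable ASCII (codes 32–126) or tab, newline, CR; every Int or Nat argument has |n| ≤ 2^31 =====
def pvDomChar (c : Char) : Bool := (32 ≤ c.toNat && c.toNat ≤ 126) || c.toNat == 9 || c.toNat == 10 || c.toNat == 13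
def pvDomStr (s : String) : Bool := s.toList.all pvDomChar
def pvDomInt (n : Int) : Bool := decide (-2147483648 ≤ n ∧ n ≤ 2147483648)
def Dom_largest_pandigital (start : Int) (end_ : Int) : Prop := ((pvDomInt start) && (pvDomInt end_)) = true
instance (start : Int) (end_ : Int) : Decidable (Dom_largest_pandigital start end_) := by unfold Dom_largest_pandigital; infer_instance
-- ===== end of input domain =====

-- B generates the candidate numbers digit-by-digit from the allowed alphabet (level-wise,
-- lengths 2..5) instead of A's scan of every integer in [10, 100000) with a per-number
-- string test; a different algorithm, output-sensitive in the size of the allowed digit set.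

-- ===== PORT A =====
-- inner 'for j in str(i): if j not in str(start)+str(end): prime_flag=False; break'
def pvAFlag (cs : List Char) (s : List Char) : Bool :=
  match cs with
  | [] => true
  | c :: rest => if !(s.contains c) then false else pvAFlag rest s

def largest_pandigital (start : Int) (end_ : Int) : List Int :=
  (PySem.List.pyRange 10 100000 1).foldl
    (fun acc i =>
      if pvAFlag (PySem.Int.toChars i) (PySem.Int.toChars start ++ PySem.Int.toChars end_)
      then acc ++ [i] else acc) []

-- ===== PORT B =====
def largest_pandigital_alt (start : Int) (end_ : Int) : List Int :=
  -- s = str(start) + str(end)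
  let s := PySem.Int.toChars start ++ PySem.Int.toChars end_
  -- digits = [d for d in range(10) if str(d) in s]
  let digits := (PySem.List.pyRange 0 10 1).filter
    (fun d => PySem.Chars.isIn (PySem.Int.toChars d) s)
  -- level = [d for d in digits if d != 0]
  let level0 := digits.filter (fun d => d ≠ 0)
  -- for _ in range(4): level = [v*10 + d for v in level for d in digits]; result.extend(level)
  let st := (PySem.List.pyRange 0 4 1).foldl
    (fun (st : List Int × List Int) _ =>
      let lv := st.1.flatMap (fun v => digits.map (fun d => v * 10 + d))
      (lv, st.2 ++ lv)) (level0, ([] : List Int))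
  st.2

-- ===== PRECONDITION & SPEC =====
def Spec_largest_pandigital (start : Int) (end_ : Int) (out : List Int) : Prop := out = largest_pandigital_alt start end_
instance (start : Int) (end_ : Int) (out : List Int) : Decidable (Spec_largest_pandigital start end_ out) := by unfold Spec_largest_pandigital; infer_instance

-- ===== CLAIM (what is proved, stated in full; the proofs are below) =====
def Claim_equal_largest_pandigital : Prop := ∀ (start : Int) (end_ : Int), Dom_largest_pandigital start end_ → Spec_largest_pandigital start end_ (largest_pandigital start end_)

-- ===== LEMMAS AND PROOFS =====

-- the decimal characters of n, most significant first (what Nat.toDigits 10 produces)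
def pvGoChars (n : Nat) : List Char :=
  if h : n / 10 = 0 then [Nat.digitChar (n % 10)]
  else pvGoChars (n / 10) ++ [Nat.digitChar (n % 10)]
termination_by n
decreasing_by
  exact Nat.div_lt_self (Nat.pos_of_ne_zero (fun h0 => h (by simp [h0]))) (by norm_num)

theorem pvToDigitsCore_eq (fuel : Nat) : ∀ (n : Nat) (ds : List Char), n < fuel →
    Nat.toDigitsCore 10 fuel n ds = pvGoChars n ++ ds := by
  induction fuel with
  | zero => intro n ds h; omega
  | succ fuel ih =>
    intro n ds h
    rw [Nat.toDigitsCore, pvGoChars]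
    by_cases h0 : n / 10 = 0
    · simp [h0]
    · have hlt : n / 10 < fuel := by
        have : n / 10 < n := Nat.div_lt_self (by omega) (by norm_num)
        omega
      rw [if_neg h0, dif_neg h0, ih (n / 10) _ hlt]
      simp

theorem pvToDigits_eq (n : Nat) : Nat.toDigits 10 n = pvGoChars n := by
  rw [Nat.toDigits, pvToDigitsCore_eq (n + 1) n [] (by omega), List.append_nil]

theorem pvAFlag_eq_all (cs s : List Char) :
    pvAFlag cs s = cs.all (fun c => s.contains c) := by
  induction cs with
  | nil => rfl
  | cons c rest ih =>
    rw [pvAFlag, ih, List.all_cons]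
    cases h : s.contains c <;> simp_all

-- 'all digits of n occur in s', by arithmetic digit extraction
def pvAllDig (s : List Char) (n : Nat) : Bool :=
  if h : n < 10 then s.contains (Nat.digitChar (n % 10))
  else s.contains (Nat.digitChar (n % 10)) && pvAllDig s (n / 10)
termination_by n
decreasing_by exact Nat.div_lt_self (by omega) (by norm_num)

theorem pvAllDig_eq_all (s : List Char) (n : Nat) :
    (pvGoChars n).all (fun c => s.contains c) = pvAllDig s n := by
  induction n using Nat.strong_induction_on with
  | _ n ih =>
    rw [pvGoChars, pvAllDig]
    by_cases h : n < 10
    · have h0 : n / 10 = 0 := by omega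
      simp [h0, h]
    · have h0 : ¬ n / 10 = 0 := by omega
      have hlt : n / 10 < n := Nat.div_lt_self (by omega) (by norm_num)
      rw [dif_neg h0, dif_neg h, ← ih (n / 10) hlt]
      simp [Bool.and_comm]

theorem pvAllDig_lt (s : List Char) (d : Nat) (hd : d < 10) :
    pvAllDig s d = s.contains (Nat.digitChar d) := by
  rw [pvAllDig, dif_pos hd, Nat.mod_eq_of_lt hd]

theorem pvAllDig_step (s : List Char) (v d : Nat) (hv : 1 ≤ v) (hd : d < 10) :
    pvAllDig s (v * 10 + d) = (s.contains (Nat.digitChar d) && pvAllDig s v) := by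
  have h1 : (v * 10 + d) % 10 = d := by omega
  have h2 : (v * 10 + d) / 10 = v := by omega
  have h3 : ¬ v * 10 + d < 10 := by omega
  rw [pvAllDig, dif_neg h3, h1, h2]

-- allowed digit alphabet, Nat side
def pvDigitsN (s : List Char) : List Nat :=
  (List.range 10).filter (fun d => s.contains (Nat.digitChar d))

-- one level extension, Nat side
def pvStepN (s : List Char) (L : List Nat) : List Nat :=
  L.flatMap (fun v => (pvDigitsN s).map (fun d => v * 10 + d))

theorem pvRangeBlocks (m : Nat) : ∀ (c b : Nat),
    List.range' (b * m) (c * m) = (List.range' b c).flatMap (fun j => List.range' (j * m) m) := by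
  intro c
  induction c with
  | zero => intro b; simp
  | succ c ih =>
    intro b
    have : (c + 1) * m = m + c * m := by ring
    rw [this, ← List.range'_append_1]
    have hbm : b * m + m = (b + 1) * m := by ring
    rw [hbm, ih (b + 1), List.range'_succ, List.flatMap_cons]

theorem pvPerValue (s : List Char) (v : Nat) (hv : 1 ≤ v) :
    (List.range' (v * 10) 10).filter (pvAllDig s)
      = if pvAllDig s v then (pvDigitsN s).map (fun d => v * 10 + d) else [] := by
  rw [List.range'_eq_map_range, List.filter_map]
  simp only [Function.comp_def]
  by_cases hp : pvAllDig s v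
  · rw [if_pos hp]
    have hc : (List.range 10).filter (fun d => pvAllDig s (v * 10 + d)) = pvDigitsN s := by
      rw [pvDigitsN]
      apply List.filter_congr
      intro d hd
      rw [pvAllDig_step s v d hv (List.mem_range.mp hd), hp, Bool.and_true]
    rw [hc]
  · rw [if_neg hp]
    have hc : (List.range 10).filter (fun d => pvAllDig s (v * 10 + d)) = [] := by
      rw [List.filter_eq_nil_iff]
      intro d hd
      rw [pvAllDig_step s v d hv (List.mem_range.mp hd)]
      simp [hp]
    rw [hc, List.map_nil]

theorem pvStepLemma (s : List Char) (R : List Nat) (h : ∀ v ∈ R, 1 ≤ v) :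
    (R.flatMap (fun v => List.range' (v * 10) 10)).filter (pvAllDig s)
      = pvStepN s (R.filter (pvAllDig s)) := by
  induction R with
  | nil => rfl
  | cons v R' ih =>
    have hv : 1 ≤ v := h v (by simp)
    rw [List.flatMap_cons, List.filter_append, pvPerValue s v hv,
      ih (fun x hx => h x (by simp [hx])), List.filter_cons]
    by_cases hp : pvAllDig s v
    · simp [hp, pvStepN]
    · simp [hp]

-- the numbers of length k+1 (value range [10^k, 10^(k+1))) all of whose digits are allowed
def pvF (s : List Char) (k : Nat) : List Nat :=
  (List.range' (10 ^ k) (9 * 10 ^ k)).filter (pvAllDig s)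

theorem pvF_succ (s : List Char) (k : Nat) : pvF s (k + 1) = pvStepN s (pvF s k) := by
  have h1 : (10 : Nat) ^ (k + 1) = 10 ^ k * 10 := by ring
  have h2 : 9 * (10 : Nat) ^ (k + 1) = (9 * 10 ^ k) * 10 := by ring
  rw [pvF, h2, h1, pvRangeBlocks 10 (9 * 10 ^ k) (10 ^ k),
    pvStepLemma s _ (fun v hv => by
      have hm := (List.mem_range'_1.mp hv).1
      have hp : 1 ≤ (10 : Nat) ^ k := Nat.one_le_pow _ _ (by norm_num)
      omega)]
  rfl

theorem pvLevel0 (s : List Char) :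
    (pvDigitsN s).filter (fun d => d ≠ 0) = pvF s 0 := by
  rw [pvDigitsN, List.filter_filter, pvF]
  have : (List.range 10) = 0 :: List.range' 1 9 := by
    rw [List.range_eq_range', List.range'_succ]
  rw [this]
  simp only [pow_zero, mul_one]
  rw [List.filter_cons]
  have : ¬ ((0 : Nat) ≠ 0 && s.contains (Nat.digitChar 0)) = true := by simp
  rw [if_neg this]
  apply List.filter_congr
  intro d hd
  have hd' := List.mem_range'_1.mp hd
  have h1 : d < 10 := by omega
  have h2 : d ≠ 0 := by omega
  rw [pvAllDig_lt s d h1]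
  simp [h2]

theorem pvSplitA (s : List Char) :
    (List.range' 10 99990).filter (pvAllDig s)
      = pvF s 1 ++ pvF s 2 ++ pvF s 3 ++ pvF s 4 := by
  have e1 := List.range'_append_1 (s := 10) (m := 90) (n := 900)
  have e2 := List.range'_append_1 (s := 10) (m := 990) (n := 9000)
  have e3 := List.range'_append_1 (s := 10) (m := 9990) (n := 90000)
  norm_num at e1 e2 e3
  rw [← e3, ← e2, ← e1]
  simp only [List.filter_append, pvF]
  norm_num

-- Int/Nat bridging
theorem pvToCharsNat (n : Nat) : PySem.Int.toChars (n : Int) = pvGoChars n := by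
  rw [PySem.Int.toChars, if_neg (by omega : ¬ ((n : Int) < 0)), pvToDigits_eq]
  simp

theorem pvABridge (s : List Char) (n : Nat) :
    pvAFlag (PySem.Int.toChars (n : Int)) s = pvAllDig s n := by
  rw [pvToCharsNat, pvAFlag_eq_all, pvAllDig_eq_all]

theorem pvIsInSingleton (c : Char) (s : List Char) :
    PySem.Chars.isIn [c] s = s.contains c := by
  have h1 := PySem.Chars.isIn_iff_infix [c] s
  rw [List.singleton_infix_iff] at h1
  have h2 : s.contains c = true ↔ c ∈ s := by simp
  rw [Bool.eq_iff_iff, h1, h2]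

theorem pvDigitsI (s : List Char) :
    (PySem.List.pyRange 0 10 1).filter (fun d => PySem.Chars.isIn (PySem.Int.toChars d) s)
      = (pvDigitsN s).map (fun n : Nat => (n : Int)) := by
  rw [PySem.List.pyRange_one]
  norm_num
  rw [List.filter_map, pvDigitsN]
  congr 1
  apply List.filter_congr
  intro d hd
  have hd10 : d < 10 := List.mem_range.mp hd
  simp only [Function.comp_def]
  rw [pvToCharsNat, pvGoChars, dif_pos (by omega : d / 10 = 0), Nat.mod_eq_of_lt hd10,
    pvIsInSingleton]

theorem pvARange :
    PySem.List.pyRange 10 100000 1 = (List.range' 10 99990).map (fun n : Nat => (n : Int)) := by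
  rw [PySem.List.pyRange_one, List.range'_eq_map_range, List.map_map]
  norm_num [Function.comp_def]
  rfl

theorem pvLevel0Cast (s : List Char) :
    ((pvDigitsN s).map (fun n : Nat => (n : Int))).filter (fun d => d ≠ 0)
      = ((pvDigitsN s).filter (fun d => d ≠ 0)).map (fun n : Nat => (n : Int)) := by
  rw [List.filter_map]
  congr 1
  apply List.filter_congr
  intro d _
  simp

theorem pvStepCast (s : List Char) (LN : List Nat) :
    (LN.map (fun n : Nat => (n : Int))).flatMap
        (fun v => ((pvDigitsN s).map (fun n : Nat => (n : Int))).map (fun d => v * 10 + d))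
      = (pvStepN s LN).map (fun n : Nat => (n : Int)) := by
  rw [List.flatMap_map, pvStepN, List.map_flatMap]
  congr 1
  funext v
  rw [List.map_map, List.map_map]
  congr 1

-- ===== VERDICT (by name: the statement is the Claim_ definition above) =====
theorem largest_pandigital_spec : Claim_equal_largest_pandigital := by
  intro start end_ _
  show largest_pandigital start end_ = largest_pandigital_alt start end_
  have h4 : PySem.List.pyRange 0 4 1 = [0, 1, 2, 3] := by decide
  rw [largest_pandigital]
  rw [PySem.List.foldl_append_if_eq_filter]
  rw [List.nil_append, pvARange, List.filter_map]
  have hfa : ∀ s : List Char, (List.range' 10 99990).filter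
        ((fun i => pvAFlag (PySem.Int.toChars i) s) ∘ (fun n : Nat => (n : Int)))
      = (List.range' 10 99990).filter (pvAllDig s) := by
    intro s
    apply List.filter_congr
    intro n _
    simp only [Function.comp_def]
    exact pvABridge s n
  rw [hfa, pvSplitA]
  simp only [largest_pandigital_alt, h4, List.foldl_cons, List.foldl_nil]
  rw [pvDigitsI, pvLevel0Cast, pvLevel0]
  rw [pvStepCast, ← pvF_succ, pvStepCast, ← pvF_succ, pvStepCast, ← pvF_succ,
    pvStepCast, ← pvF_succ]
  simp [List.map_append, List.append_assoc]
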